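-- pv_equiv track=rewrite | github.com/GreenDelta/usio | pipeline/bea2002.py | _parse_use_header
-- ===== SOURCE A (Python) =====
-- def _parse_use_header(line):
--     headers = []
--     header = ''
--     in_header = False
--     start = -1
--     for i in range(0, len(line)):
--         c = line[i]
--         if c == ' ' and in_header:
--             headers.append((header.strip(), start))
--             header = ''
--             in_header = False
--             start = -1
--         if c != ' ':
--             header += c
--             if not in_header:
--                 in_header = True
--                 start = i
--     return headers
-- ===== SOURCE B (Python) =====
-- def _parse_use_header(line):
--     # Run-scan with two indices instead of a char-by-char state machine:
--     # each maximal run of non-space chars that is followed by a space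
--     # becomes one (token.strip(), start) entry (a trailing run at end of
--     # line, not followed by a space, is not emitted, matching A).
--     out = []
--     n = len(line)
--     i = 0
--     while i < n:
--         if line[i] == ' ':
--             i += 1
--             continue
--         j = i
--         while j < n and line[j] != ' ':
--             j += 1
--         if j < n:
--             out.append((line[i:j].strip(), i))
--         i = j
--     return out
-- ===== Notes on version B (the rewrite author's own statement) =====
-- stated objective: alternative
-- what changed: Replaces the character-by-character state machine (in_header flag, incremental header += c accumulation) with a two-pointer run scan that finds each maximal non-space run at once and slices it out of the line.
import Mathlib
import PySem

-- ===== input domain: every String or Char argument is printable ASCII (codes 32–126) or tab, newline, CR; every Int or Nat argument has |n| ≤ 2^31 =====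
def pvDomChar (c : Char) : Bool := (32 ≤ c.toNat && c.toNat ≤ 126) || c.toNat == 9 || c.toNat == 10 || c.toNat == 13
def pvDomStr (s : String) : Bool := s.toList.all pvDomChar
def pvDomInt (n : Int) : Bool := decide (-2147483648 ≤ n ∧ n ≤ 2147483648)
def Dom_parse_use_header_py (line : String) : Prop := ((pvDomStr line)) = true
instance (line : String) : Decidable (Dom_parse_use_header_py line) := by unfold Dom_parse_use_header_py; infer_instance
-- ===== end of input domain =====

-- B replaces A's char-by-char state machine with a two-pointer maximal-run scan; same cost, different structure.


-- ===== PORT A =====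
-- state = (headers, header, in_header, start); one fold step per character, exactly A's loop body
def pvStepA (s : List (String × Int) × String × Bool × Int) (ci : Int × Char) :
    List (String × Int) × String × Bool × Int :=
  let (headers, header, in_header, start) := s
  let (i, c) := ci
  let (headers, header, in_header, start) :=
    if c = ' ' ∧ in_header then
      (headers ++ [(PySem.Str.strip header, start)], "", false, (-1 : Int))
    else (headers, header, in_header, start)
  if c ≠ ' ' then
    let (in_header, start) := if ¬ in_header then (true, i) else (in_header, start)
    (headers, header.push c, in_header, start)
  else (headers, header, in_header, start)

def parse_use_header_py (line : String) : List (String × Int) :=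
  ((PySem.List.enumerate line.toList 0).foldl pvStepA ([], "", false, (-1 : Int))).1

-- ===== PORT B =====
-- Source B's outer while: skip a space, or slice out the maximal non-space run starting here
def pvAltGo (cs : List Char) (i : Int) : List (String × Int) :=
  match cs with
  | [] => []
  | c :: rest =>
    if c = ' ' then pvAltGo rest (i + 1)
    else
      -- inner while loop: j runs to the end of the non-space run
      let run := (c :: rest).takeWhile (fun x => x ≠ ' ')
      let rest' := (c :: rest).dropWhile (fun x => x ≠ ' ')
      if rest' = [] then []
      else (PySem.Str.strip (String.ofList run), i) :: pvAltGo rest' (i + run.length)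
termination_by cs.length
decreasing_by
  · simp
  · simp_all
    exact List.length_dropWhile_le _ _

def parse_use_header_py_alt (line : String) : List (String × Int) :=
  pvAltGo line.toList 0

-- ===== PRECONDITION & SPEC =====
def Spec_parse_use_header_py (line : String) (out : List (String × Int)) : Prop := out = parse_use_header_py_alt line
instance (line : String) (out : List (String × Int)) : Decidable (Spec_parse_use_header_py line out) := by unfold Spec_parse_use_header_py; infer_instance

-- ===== CLAIM (what is proved, stated in full; the proofs are below) =====
def Claim_equal_parse_use_header_py : Prop := ∀ (line : String), Dom_parse_use_header_py line → Spec_parse_use_header_py line (parse_use_header_py line)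

-- ===== LEMMAS AND PROOFS =====

theorem pv_push_append (h : String) (c : Char) (l : List Char) :
    h.push c ++ String.ofList l = h ++ String.ofList (c :: l) := by
  apply String.toList_inj.mp
  simp

theorem pv_altGo_space (rest : List Char) (n : Int) :
    pvAltGo (' ' :: rest) n = pvAltGo rest (n + 1) := by
  rw [pvAltGo]; simp

theorem pv_main : ∀ (N : Nat) (cs : List Char), cs.length ≤ N →
    (∀ (n : Int) (acc : List (String × Int)),
      ((PySem.List.enumerate cs n).foldl pvStepA (acc, "", false, (-1 : Int))).1
        = acc ++ pvAltGo cs n) ∧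
    (∀ (n : Int) (acc : List (String × Int)) (h : String) (st : Int),
      ((PySem.List.enumerate cs n).foldl pvStepA (acc, h, true, st)).1
        = (if (cs.dropWhile (fun x => x ≠ ' ')) = [] then acc
           else acc ++ ((PySem.Str.strip (h ++ String.ofList (cs.takeWhile (fun x => x ≠ ' '))), st)
                 :: pvAltGo (cs.dropWhile (fun x => x ≠ ' '))
                      (n + ((cs.takeWhile (fun x => x ≠ ' ')).length : Int))))) := by
  intro N
  induction N with
  | zero =>
    intro cs hlen
    have : cs = [] := List.eq_nil_of_length_eq_zero (Nat.le_zero.mp hlen)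
    subst this
    constructor
    · intro n acc; simp [PySem.List.enumerate, pvAltGo]
    · intro n acc h st; simp [PySem.List.enumerate]
  | succ N ih =>
    intro cs hlen
    match cs with
    | [] =>
      constructor
      · intro n acc; simp [PySem.List.enumerate, pvAltGo]
      · intro n acc h st; simp [PySem.List.enumerate]
    | c :: rest =>
      have hr : rest.length ≤ N := by simpa using Nat.succ_le_succ_iff.mp (by simpa using hlen)
      constructor
      · intro n acc
        rw [PySem.List.enumerate_cons]
        by_cases hc : c = ' '
        · subst hc
          have hstep : pvStepA (acc, "", false, (-1 : Int)) (n, ' ')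
              = (acc, "", false, (-1 : Int)) := by simp [pvStepA]
          rw [List.foldl_cons, hstep, (ih rest hr).1 (n + 1) acc, pv_altGo_space]
        · have hstep : pvStepA (acc, "", false, (-1 : Int)) (n, c)
              = (acc, String.ofList [c], true, n) := by
            simp [pvStepA, hc]; rfl
          rw [List.foldl_cons, hstep, (ih rest hr).2 (n + 1) acc (String.ofList [c]) n,
              pvAltGo]
          rw [if_neg hc]
          rw [List.takeWhile_cons_of_pos (by simp [hc]), List.dropWhile_cons_of_pos (by simp [hc])]
          rcases eq_or_ne (List.dropWhile (fun x => x ≠ ' ') rest) [] with hd | hd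
          · rw [if_pos hd, if_pos hd]; simp
          · rw [if_neg hd, if_neg hd]
            have e1 : String.ofList [c] ++ String.ofList (List.takeWhile (fun x => x ≠ ' ') rest)
                = String.ofList (c :: List.takeWhile (fun x => x ≠ ' ') rest) := by
              simpa using pv_push_append "" c (List.takeWhile (fun x => x ≠ ' ') rest)
            have e2 : (n + 1) + ((List.takeWhile (fun x => x ≠ ' ') rest).length : Int)
                = n + (((c :: List.takeWhile (fun x => x ≠ ' ') rest).length : Int)) := by
              simp only [List.length_cons]; push_cast; ring
            rw [e1, e2]
      · intro n acc h st
        rw [PySem.List.enumerate_cons]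
        by_cases hc : c = ' '
        · subst hc
          have hstep : pvStepA (acc, h, true, st) (n, ' ')
              = (acc ++ [(PySem.Str.strip h, st)], "", false, (-1 : Int)) := by
            simp [pvStepA]
          rw [List.foldl_cons, hstep, (ih rest hr).1 (n + 1) (acc ++ [(PySem.Str.strip h, st)])]
          have hd : (List.dropWhile (fun x => decide (x ≠ ' ')) (' ' :: rest)) = ' ' :: rest := by
            simp
          have ht : (List.takeWhile (fun x => decide (x ≠ ' ')) (' ' :: rest)) = [] := by
            simp
          rw [ht, hd, if_neg (by simp)]
          simp [pv_altGo_space]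
        · have hstep : pvStepA (acc, h, true, st) (n, c)
              = (acc, h.push c, true, st) := by
            simp [pvStepA, hc]
          rw [List.foldl_cons, hstep, (ih rest hr).2 (n + 1) acc (h.push c) st]
          rw [List.takeWhile_cons_of_pos (by simp [hc]), List.dropWhile_cons_of_pos (by simp [hc])]
          rcases eq_or_ne (List.dropWhile (fun x => x ≠ ' ') rest) [] with hd | hd
          · rw [if_pos hd, if_pos hd]
          · rw [if_neg hd, if_neg hd]
            have e2 : (n + 1) + ((List.takeWhile (fun x => x ≠ ' ') rest).length : Int)
                = n + (((c :: List.takeWhile (fun x => x ≠ ' ') rest).length : Int)) := by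
              simp only [List.length_cons]; push_cast; ring
            rw [pv_push_append, e2]

-- ===== VERDICT (by name: the statement is the Claim_ definition above) =====
theorem parse_use_header_py_spec : Claim_equal_parse_use_header_py := by
  intro line _
  unfold Spec_parse_use_header_py parse_use_header_py parse_use_header_py_alt
  exact (pv_main line.toList.length line.toList le_rfl).1 0 []
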